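-- pv_equiv track=rewrite | github.com/maizer2/L2W | app/pdf_read.py | page_refine
-- ===== SOURCE A (Python) =====
-- def page_refine(page):
--
--     # 단어를 저장할 변수
--     word = None
--     # 페이지 내 모든 단어를 저장할 리스트 변수
--     page_words = []
--
--     # 어떻게 저장할까?
--     # " " 띄어쓰기가 오기 전까지 단어를 저장한다.
--     # 띄어쓰기 단어 띄어씌기형식이르모
--     ## 띄어쓰기가 나온 기준부터 다음 띄어쓰기가 나올 때까지 단어로서 저장한다.
--
--     # 전체 문자만큼 반복한다.
--     for i in range(len(page)):
--
--         # 알파벳 외에는 무시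
--         ## 대소문자 주의
--         if page[i] == " " or page[i] == "a" or page[i] == "b" or page[i] == "c" or page[i] == "d" or page[i] == "e" or page[i] == "f" or page[i] == "g" or page[i] == "h" or page[i] == "i" or page[i] == "j" or page[i] == "k" or page[i] == "l" or page[i] == "m" or page[i] == "n" or page[i] == "o" or page[i] == "p" or page[i] == "q" or page[i] == "r" or page[i] == "s" or page[i] == "t" or page[i] == "u" or page[i] == "v" or page[i] == "w" or page[i] == "x" or page[i] == "y" or page[i] == "z" or page[i] == "A" or page[i] == "B" or page[i] == "C" or page[i] == "D" or page[i] == "E" or page[i] == "F" or page[i] == "G" or page[i] == "H" or page[i] == "I" or page[i] == "J" or page[i] == "K" or page[i] == "L" or page[i] == "M" or page[i] == "N" or page[i] == "O" or page[i] == "P" or page[i] == "Q" or page[i] == "R" or page[i] == "S" or page[i] == "T" or page[i] == "U" or page[i] == "V" or page[i] == "W" or page[i] == "X" or page[i] == "Y" or page[i] == "Z":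
--
--             # " ", space 문자가 나오면 끝
--             ## word 초기화 해야함
--             if page[i] == " ":
--
--                 # 만약 space 문자가 연속으로 올 경우 None이 들어가는 경우를 방지해주는 조건문
--                 if word == None:
--                     continue
--                 else:
--                     page_words.append(word)
--
--                     # word 변수 초기화
--                     word = None
--
--                 continue
--
--             # 초기화 후 첫 단어일 경우 첫 문자 넣기 위한 조건문
--             if word == None:
--                 word = page[i]
--             else:
--                 word += page[i]
--
--     # 마지막 단어일 경우, space가 없기 때문에 따로 처리해줘야함
--     # 마지막 분기 일 경우 마지막 단어 저장
--     if word != None: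
--         page_words.append(word)
--
--     return page_words
-- ===== SOURCE B (Python) =====
-- def page_refine(page):
--     letters = set("abcdefghijklmnopqrstuvwxyzABCDEFGHIJKLMNOPQRSTUVWXYZ")
--     page_words = []
--     for token in page.split(" "):
--         word = "".join(ch for ch in token if ch in letters)
--         if word:
--             page_words.append(word)
--     return page_words
-- ===== Notes on version B (the rewrite author's own statement) =====
-- stated objective: simpler
-- what changed: Replaced the char-by-char state machine (Option word accumulator with a 52-way or-chain and a final flush) by a two-phase pass: split on single spaces, keep the ASCII-letter characters of each token, append the token iff non-empty.
import Mathlib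
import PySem

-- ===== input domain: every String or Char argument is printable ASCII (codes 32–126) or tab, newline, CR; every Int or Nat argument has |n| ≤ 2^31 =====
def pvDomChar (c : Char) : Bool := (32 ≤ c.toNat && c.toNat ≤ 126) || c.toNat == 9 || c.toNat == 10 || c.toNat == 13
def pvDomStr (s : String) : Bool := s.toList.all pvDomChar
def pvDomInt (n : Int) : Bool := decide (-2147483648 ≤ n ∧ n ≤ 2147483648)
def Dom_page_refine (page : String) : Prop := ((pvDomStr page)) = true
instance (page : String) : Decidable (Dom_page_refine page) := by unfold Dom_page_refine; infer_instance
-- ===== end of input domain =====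

-- B is simpler: split on single spaces and keep each token's ASCII letters, instead of A's
-- char-by-char state machine; return values proved equal on all inputs (both are total).

-- ASCII letter test, the condition A spells out as a 52-way or-chain and B as set membership.
def pvLetter (c : Char) : Bool :=
  (97 ≤ c.toNat && c.toNat ≤ 122) || (65 ≤ c.toNat && c.toNat ≤ 90)

-- ===== PORT A =====
-- A's loop body: word is Option (List Char) (None ↔ Python's word == None), words accumulate
-- in order; strings are handled as List Char (PySem convention) and packed at the end.
def pvAstep (st : Option (List Char) × List (List Char)) (c : Char) :
    Option (List Char) × List (List Char) :=
  if c = ' ' || pvLetter c then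
    if c = ' ' then
      match st.1 with
      | none => st
      | some w => (none, st.2 ++ [w])
    else
      match st.1 with
      | none => (some [c], st.2)
      | some w => (some (w ++ [c]), st.2)
  else st

-- A's final flush: "if word != None: page_words.append(word)"
def pvAfin (st : Option (List Char) × List (List Char)) : List (List Char) :=
  match st.1 with
  | none => st.2
  | some w => st.2 ++ [w]

def page_refine (page : String) : List String :=
  (pvAfin ((PySem.List.pyRange 0 (PySem.Str.len page)).foldl
    (fun st i => pvAstep st (PySem.List.pyGetD page.toList i ' ')) (none, []))).map String.ofList

-- ===== PORT B =====
def page_refine_alt (page : String) : List String :=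
  ((PySem.Chars.splitOn page.toList [' ']).foldl
    (fun out tok =>
      let w := tok.filter pvLetter
      if w ≠ [] then out ++ [w] else out) []).map String.ofList

-- ===== PRECONDITION & SPEC =====
def Spec_page_refine (page : String) (out : List String) : Prop := out = page_refine_alt page
instance (page : String) (out : List String) : Decidable (Spec_page_refine page out) := by unfold Spec_page_refine; infer_instance

-- ===== CLAIM (what is proved, stated in full; the proofs are below) =====
def Claim_equal_page_refine : Prop := ∀ (page : String), Dom_page_refine page → Spec_page_refine page (page_refine page)

-- ===== LEMMAS AND PROOFS =====

-- structural recursion computing split-on-single-space, used to reason about PySem.Chars.splitOn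
def pvSplit : List Char → List (List Char)
  | [] => [[]]
  | c :: cs =>
    if c = ' ' then [] :: pvSplit cs
    else
      match pvSplit cs with
      | [] => [[c]]
      | t :: ts => (c :: t) :: ts

lemma pvSplit_ne_nil (cs : List Char) : pvSplit cs ≠ [] := by
  cases cs with
  | nil => simp [pvSplit]
  | cons c cs =>
    simp only [pvSplit]
    split_ifs
    · simp
    · cases h : pvSplit cs <;> simp

lemma splitOn_go_eq (fuel : Nat) :
    ∀ (l cur : List Char) (acc : List (List Char)), l.length < fuel →
    PySem.Chars.splitOn.go [' '] fuel l cur acc =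
      acc.reverse ++
        (match pvSplit l with
         | [] => []
         | t :: ts => (cur.reverse ++ t) :: ts) := by
  induction fuel with
  | zero => intro l cur acc h; omega
  | succ fuel ih =>
    intro l cur acc h
    cases l with
    | nil => simp [PySem.Chars.splitOn.go, pvSplit]
    | cons c rest =>
      by_cases hc : c = ' '
      · subst hc
        have : PySem.Chars.splitOn.go [' '] (fuel+1) (' ' :: rest) cur acc =
            PySem.Chars.splitOn.go [' '] fuel rest [] (cur.reverse :: acc) := by
          simp [PySem.Chars.splitOn.go, List.isPrefixOf]
        rw [this, ih rest [] (cur.reverse :: acc) (by simpa using Nat.lt_of_succ_lt_succ h)]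
        simp [pvSplit]
        cases ht : pvSplit rest with
        | nil => exact absurd ht (pvSplit_ne_nil rest)
        | cons t ts => simp
      · have : PySem.Chars.splitOn.go [' '] (fuel+1) (c :: rest) cur acc =
            PySem.Chars.splitOn.go [' '] fuel rest (c :: cur) acc := by
          simp [PySem.Chars.splitOn.go, List.isPrefixOf, Ne.symm hc]
        rw [this, ih rest (c :: cur) acc (by simpa using Nat.lt_of_succ_lt_succ h)]
        simp [pvSplit, hc]
        cases ht : pvSplit rest with
        | nil => exact absurd ht (pvSplit_ne_nil rest)
        | cons t ts => simp

lemma splitOn_eq_pvSplit (cs : List Char) :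
    PySem.Chars.splitOn cs [' '] = pvSplit cs := by
  unfold PySem.Chars.splitOn
  rw [splitOn_go_eq (cs.length + 1) cs [] [] (by omega)]
  cases ht : pvSplit cs with
  | nil => exact absurd ht (pvSplit_ne_nil cs)
  | cons t ts => simp

-- the value B computes from the tail tokens
def pvBtail (ts : List (List Char)) : List (List Char) :=
  (ts.map (List.filter pvLetter)).filter (· ≠ [])

-- main invariant: running A's loop from word = w (accumulated letters of the current token,
-- none ↔ w = []) yields acc ++ (current-token letters prefixed by w, then B's tail value)
lemma pvA_invariant (cs : List Char) :
    ∀ (w : List Char) (acc : List (List Char)),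
    pvAfin (cs.foldl pvAstep ((if w = [] then none else some w), acc)) =
      acc ++
        (match pvSplit cs with
         | [] => []
         | t :: ts =>
           (if w ++ t.filter pvLetter = [] then [] else [w ++ t.filter pvLetter]) ++ pvBtail ts) := by
  induction cs with
  | nil =>
    intro w acc
    by_cases hw : w = [] <;> simp [hw, pvAfin, pvSplit, pvBtail]
  | cons c cs ih =>
    intro w acc
    by_cases hc : c = ' '
    · subst hc
      have hstep : pvAstep ((if w = [] then none else some w), acc) ' ' =
          (none, acc ++ (if w = [] then [] else [w])) := by
        by_cases hw : w = [] <;> simp [hw, pvAstep]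
      simp only [List.foldl_cons, hstep]
      have := ih [] (acc ++ (if w = [] then [] else [w]))
      simp only [reduceIte, List.nil_append] at this
      rw [this]
      simp only [pvSplit]
      cases ht : pvSplit cs with
      | nil => exact absurd ht (pvSplit_ne_nil cs)
      | cons t ts =>
        simp only [pvBtail, List.append_assoc]
        by_cases he : t.filter pvLetter = [] <;> simp [he]
    · by_cases hl : pvLetter c = true
      · have hstep : pvAstep ((if w = [] then none else some w), acc) c =
            (some (w ++ [c]), acc) := by
          by_cases hw : w = [] <;> simp [hw, pvAstep, hc, hl]
        simp only [List.foldl_cons, hstep]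
        have := ih (w ++ [c]) acc
        rw [if_neg (by simp)] at this
        rw [this]
        simp only [pvSplit, if_neg hc]
        cases ht : pvSplit cs with
        | nil => exact absurd ht (pvSplit_ne_nil cs)
        | cons t ts =>
          simp [hl, List.append_assoc]
      · have hl' : pvLetter c = false := by simpa using hl
        have hstep : pvAstep ((if w = [] then none else some w), acc) c =
            ((if w = [] then none else some w), acc) := by
          by_cases hw : w = [] <;> simp [hw, pvAstep, hc, hl']
        simp only [List.foldl_cons, hstep]
        rw [ih w acc]
        simp only [pvSplit, if_neg hc]
        cases ht : pvSplit cs with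
        | nil => exact absurd ht (pvSplit_ne_nil cs)
        | cons t ts =>
          simp [hl']

lemma pvfold_eq (l : List (List Char)) (acc : List (List Char)) :
    l.foldl (fun out tok =>
      let w := tok.filter pvLetter
      if w ≠ [] then out ++ [w] else out) acc = acc ++ pvBtail l := by
  rw [show (fun (out : List (List Char)) (tok : List Char) =>
        let w := tok.filter pvLetter
        if w ≠ [] then out ++ [w] else out) =
      (fun out tok => if (fun tok : List Char => decide (tok.filter pvLetter ≠ [])) tok = true
        then out ++ [(fun tok : List Char => tok.filter pvLetter) tok] else out) from
    funext fun _ => funext fun _ => by simp]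
  rw [PySem.List.foldl_append_if]
  unfold pvBtail
  rw [List.filter_map]
  refine congrArg (acc ++ ·) (congrArg (List.map _) ?_)
  apply List.filter_congr
  intro x _
  simp only [Function.comp_def, ne_eq, List.filter_eq_nil_iff]

lemma pvB_eq (cs : List Char) :
    ((PySem.Chars.splitOn cs [' ']).foldl
      (fun out tok =>
        let w := tok.filter pvLetter
        if w ≠ [] then out ++ [w] else out) []) =
      (match pvSplit cs with
       | [] => []
       | t :: ts =>
         (if t.filter pvLetter = [] then [] else [t.filter pvLetter]) ++ pvBtail ts) := by
  rw [splitOn_eq_pvSplit]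
  cases ht : pvSplit cs with
  | nil => simp
  | cons t ts =>
    rw [List.foldl_cons, pvfold_eq]
    by_cases he : t.filter pvLetter = [] <;> simp [he]

-- ===== VERDICT (by name: the statement is the Claim_ definition above) =====
theorem page_refine_spec : Claim_equal_page_refine := by
  intro page _
  unfold Spec_page_refine page_refine page_refine_alt
  have hlen : PySem.Str.len page = (page.toList.length : Int) := by
    simp [PySem.Str.len_eq]
  rw [hlen, PySem.List.foldl_pyRange_zero_pyGetD' page.toList ' ' pvAstep (none, [])]
  rw [pvB_eq page.toList]
  have h := pvA_invariant page.toList [] []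
  simp only [reduceIte, List.nil_append] at h
  rw [h]
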